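-- pv_equiv track=rewrite | github.com/EmiRoberti77/wren_clive_fe | heatmap_api.py | dwell_path
-- ===== SOURCE A (Python) =====
-- def dwell_path(dwell_time_area):
--     d={i:"" for i in dwell_time_area}
--     for id in dwell_time_area:
--         dd=dwell_time_area[id]
--         tf=[j for i in dd.values() for j in i]
--         tf.sort()
--         tfid={j:i for i in dd for j in dd[i]}
--         d[id]="".join([str(tfid[i]) for i in tf])
--     return d
-- ===== SOURCE B (Python) =====
-- def dwell_path(dwell_time_area):
--     result = {}
--     for aid in dwell_time_area:
--         dd = dwell_time_area[aid]
--         tfid = {}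
--         cnt = {}
--         for sub in dd:
--             for v in dd[sub]:
--                 tfid[v] = sub
--                 cnt[v] = cnt.get(v, 0) + 1
--         result[aid] = "".join(tfid[v] * cnt[v] for v in sorted(cnt))
--     return result
-- ===== Notes on version B (the rewrite author's own statement) =====
-- stated objective: alternative
-- what changed: B builds the value->subid map and an occurrence counter in one pass over the inner dict, then sorts only the distinct dwell values and emits each subid repeated by its count, instead of flattening, sorting the whole value list and looking every element up.
import Mathlib
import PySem

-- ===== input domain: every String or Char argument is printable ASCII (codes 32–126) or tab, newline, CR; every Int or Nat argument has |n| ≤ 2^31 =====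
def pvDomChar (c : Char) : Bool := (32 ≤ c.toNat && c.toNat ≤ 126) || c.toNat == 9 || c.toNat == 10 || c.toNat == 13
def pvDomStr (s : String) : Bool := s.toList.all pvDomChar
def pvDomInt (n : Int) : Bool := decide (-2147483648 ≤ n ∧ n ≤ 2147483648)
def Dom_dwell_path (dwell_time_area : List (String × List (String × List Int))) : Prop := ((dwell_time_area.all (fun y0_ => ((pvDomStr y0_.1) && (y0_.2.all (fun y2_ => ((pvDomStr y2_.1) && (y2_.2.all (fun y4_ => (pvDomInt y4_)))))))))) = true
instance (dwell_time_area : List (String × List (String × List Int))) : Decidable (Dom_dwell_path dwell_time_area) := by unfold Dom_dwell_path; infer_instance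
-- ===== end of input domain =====

-- B sorts only the DISTINCT dwell values and repeats each sub-id by its count (built in one pass
-- together with the value→sub-id map), instead of sorting the whole flattened value list and
-- looking each element up; same return value, alternative decomposition.
-- Both arguments are Python dicts encoded as association lists: lookup is first match and
-- iteration is over the first occurrences of the keys (dedup), in both ports alike.

-- ===== PORT A =====
-- dd[i] for the inner dict (first binding wins); Python's KeyError cannot occur here
-- because every looked-up key comes from the dict itself.
def pvLk (dd : List (String × List Int)) (k : String) : List Int :=
  (List.lookup k dd).getD []

def dwell_path (dwell_time_area : List (String × List (String × List Int))) : List (String × String) :=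
  let keys := PySem.List.dedup (dwell_time_area.map Prod.fst)
  -- d = {i: "" for i in dwell_time_area}
  let d0 : PySem.Dict String String := keys.foldl (fun d i => d.insert i "") PySem.Dict.empty
  let d := keys.foldl (fun d id =>
      let dd := (List.lookup id dwell_time_area).getD []
      let iks := PySem.List.dedup (dd.map Prod.fst)
      -- tf = [j for i in dd.values() for j in i]; tf.sort()
      let tf := (iks.map (fun i => pvLk dd i)).flatten
      let tfs := PySem.List.sorted tf (fun x => x)
      -- tfid = {j: i for i in dd for j in dd[i]}
      let tfid : PySem.Dict Int String :=
        iks.foldl (fun t i => (pvLk dd i).foldl (fun t j => t.insert j i) t) PySem.Dict.empty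
      -- str(tfid[i]) on a string key is the string itself; tfid[i] is always present (i comes from tf)
      d.insert id (PySem.Str.join "" (tfs.map (fun i => (tfid.get? i).getD ""))))
    d0
  d.items

-- ===== PORT B =====
-- Python's s * n on a string (n ≤ 0 gives "")
def pvStrMul (s : String) (n : Int) : String := PySem.Str.join "" (List.replicate n.toNat s)

def dwell_path_alt (dwell_time_area : List (String × List (String × List Int))) : List (String × String) :=
  let keys := PySem.List.dedup (dwell_time_area.map Prod.fst)
  let res := keys.foldl (fun res aid =>
      let dd := (List.lookup aid dwell_time_area).getD []
      -- one pass: tfid (value → sub-id, last writer wins) and cnt (value → occurrences)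
      let p := (PySem.List.dedup (dd.map Prod.fst)).foldl (fun p sub =>
          (pvLk dd sub).foldl
            (fun p v => (p.1.insert v sub, p.2.insert v (p.2.getD v 0 + 1))) p)
        ((PySem.Dict.empty : PySem.Dict Int String), (PySem.Dict.empty : PySem.Dict Int Int))
      res.insert aid (PySem.Str.join ""
        ((PySem.List.sorted p.2.keys (fun x => x)).map
          (fun v => pvStrMul ((p.1.get? v).getD "") (p.2.getD v 0)))))
    PySem.Dict.empty
  res.items

-- ===== PRECONDITION & SPEC =====
def Spec_dwell_path (dwell_time_area : List (String × List (String × List Int))) (out : List (String × String)) : Prop := out = dwell_path_alt dwell_time_area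
instance (dwell_time_area : List (String × List (String × List Int))) (out : List (String × String)) : Decidable (Spec_dwell_path dwell_time_area out) := by unfold Spec_dwell_path; infer_instance

-- ===== CLAIM (what is proved, stated in full; the proofs are below) =====
def Claim_equal_dwell_path : Prop := ∀ (dwell_time_area : List (String × List (String × List Int))), Dom_dwell_path dwell_time_area → Spec_dwell_path dwell_time_area (dwell_path dwell_time_area)

-- ===== LEMMAS AND PROOFS =====

-- a fold whose step acts componentwise on a pair splits into two folds
theorem pv_foldl_prod {α β γ : Type} (l : List γ) (f : α → γ → α) (g : β → γ → β) (a : α) (b : β) :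
    l.foldl (fun p x => (f p.1 x, g p.2 x)) (a, b) = (l.foldl f a, l.foldl g b) := by
  induction l generalizing a b with
  | nil => rfl
  | cons x xs ih => simpa using ih (f a x) (g b x)

-- the nested pair fold of port B splits into port A's tfid fold and a counter fold
theorem pv_foldl_prod_nested {α β : Type} (ks : List String) (lk : String → List Int)
    (f : α → String → Int → α) (g : β → Int → β) (a : α) (b : β) :
    ks.foldl (fun p sub => (lk sub).foldl (fun p v => (f p.1 sub v, g p.2 v)) p) (a, b)
      = (ks.foldl (fun t sub => (lk sub).foldl (fun t v => f t sub v) t) a,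
         ks.foldl (fun c sub => (lk sub).foldl g c) b) := by
  induction ks generalizing a b with
  | cons k ks ih =>
    simp only [List.foldl_cons]
    rw [pv_foldl_prod (lk k) (fun a v => f a k v) g a b]
    exact ih _ _
  | nil => rfl

-- counting in a flatMap of replicate-blocks over distinct values
theorem pv_count_flatMap_replicate (S : List Int) (n : Int → Nat) (x : Int) (hnd : S.Nodup) :
    (S.flatMap (fun v => List.replicate (n v) v)).count x = if x ∈ S then n x else 0 := by
  induction S with
  | nil => simp
  | cons v S ih =>
    rcases List.nodup_cons.mp hnd with ⟨hv, hnd'⟩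
    simp only [List.flatMap_cons, List.count_append, ih hnd', List.count_replicate, List.mem_cons]
    by_cases hxv : x = v
    · subst hxv; simp [hv]
    · simp [hxv, Ne.symm hxv]

-- Python's sorted list is the sorted distinct values, each repeated by its count
theorem pv_sorted_eq_flatMap (tf : List Int) :
    PySem.List.sorted tf (fun x => x)
      = (PySem.List.sorted (PySem.Set.ofList tf) (fun x => x)).flatMap
          (fun v => List.replicate (tf.count v) v) := by
  set S := PySem.List.sorted (PySem.Set.ofList tf) (fun x => x) with hS
  have hndS : S.Nodup := (PySem.List.sorted_perm _ _ _).symm.nodup (PySem.Set.nodup_ofList tf)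
  have hmem : ∀ x : Int, x ∈ S ↔ x ∈ tf := by
    intro x
    rw [hS, PySem.List.mem_sorted, PySem.Set.mem_ofList]
  apply PySem.List.sorted_id_eq_of_perm_of_pairwise
  · rw [List.perm_iff_count]
    intro x
    rw [pv_count_flatMap_replicate S _ x hndS]
    by_cases hx : x ∈ tf
    · simp [(hmem x).mpr hx]
    · simp [List.count_eq_zero_of_not_mem hx]
  · have hlt : S.Pairwise (· < ·) := PySem.List.sorted_ofList_pairwise_lt tf
    rw [List.flatMap_def, List.pairwise_flatten]
    constructor
    · intro l hl
      rcases List.mem_map.mp hl with ⟨v, _, rfl⟩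
      exact List.pairwise_replicate.mpr (Or.inr (le_refl v))
    · refine List.Pairwise.map _ ?_ hlt
      intro a b hab x hx y hy
      rw [List.eq_of_mem_replicate hx, List.eq_of_mem_replicate hy]
      exact le_of_lt hab

-- "".join with empty separator concatenates
theorem pv_chars_join_nil (parts : List (List Char)) : PySem.Chars.join [] parts = parts.flatten := by
  induction parts with
  | nil => rfl
  | cons p ps ih =>
    cases ps with
    | nil => simp [PySem.Chars.join, List.intercalate]
    | cons q qs =>
      simp only [PySem.Chars.join, List.intercalate] at *
      simp_all [List.intersperse]

theorem pv_join_empty (parts : List String) :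
    PySem.Str.join "" parts = String.ofList ((parts.map String.toList).flatten) := by
  simp [PySem.Str.join, pv_chars_join_nil]

-- mapping over the sorted list block-by-block equals the per-distinct-value repeated strings
theorem pv_join_blocks (S : List Int) (f : Int → String) (n : Int → Nat) :
    PySem.Str.join "" ((S.flatMap (fun v => List.replicate (n v) v)).map f)
      = PySem.Str.join "" (S.map (fun v => PySem.Str.join "" (List.replicate (n v) (f v)))) := by
  rw [pv_join_empty, pv_join_empty]
  apply congrArg
  induction S with
  | nil => rfl
  | cons v S ih =>
    simp only [List.flatMap_cons, List.map_append, List.flatten_append, List.map_cons,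
      List.flatten_cons, List.map_replicate, ih, pv_join_empty, String.toList_ofList]

-- overwriting loop over the still-missing nodup keys of an initialised dict
theorem pv_overwrite (ks : List String) (f : String → String) (pre : List (String × String))
    (h : (pre.map Prod.fst ++ ks).Nodup) :
    ks.foldl (fun d k => d.insert k (f k))
        (PySem.Dict.mk (pre ++ ks.map (fun k => (k, ""))))
      = PySem.Dict.mk (pre ++ ks.map (fun k => (k, f k))) := by
  induction ks generalizing pre with
  | nil => simp
  | cons k ks ih =>
    have hnd := h
    rw [List.nodup_append] at hnd
    have hkpre : ∀ p ∈ pre, p.1 ≠ k := by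
      intro p hp
      exact hnd.2.2 p.1 (List.mem_map_of_mem hp) k (List.mem_cons_self ..)
    have hkks : k ∉ ks := (List.nodup_cons.mp hnd.2.1).1
    simp only [List.foldl_cons]
    have hc : (PySem.Dict.mk (pre ++ (k, "") :: ks.map (fun k => (k, "")))).contains k = true := by
      rw [PySem.Dict.contains_iff_mem_keys]
      simp [PySem.Dict.keys]
    rw [List.map_cons] at *
    have hit := PySem.Dict.items_insert_of_contains
      (PySem.Dict.mk (pre ++ (k, "") :: ks.map (fun k => (k, "")))) (f k) hc
    have hmap : (List.map (fun p => if (p.1 == k) = true then (k, f k) else p)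
        (pre ++ (k, "") :: ks.map (fun k => (k, ""))))
        = pre ++ (k, f k) :: ks.map (fun k => (k, "")) := by
      rw [List.map_append, List.map_cons]
      congr 1
      · have := List.map_congr_left (l := pre)
          (f := fun p : String × String => if (p.1 == k) = true then (k, f k) else p)
          (g := fun p => p) (fun p hp => by simp [hkpre p hp])
        simpa using this
      · congr 1
        · simp
        · rw [List.map_map]
          apply List.map_congr_left
          intro x hx
          have : x ≠ k := fun hxk => hkks (hxk ▸ hx)
          simp [this]
    have hd : (PySem.Dict.mk (pre ++ (k, "") :: ks.map (fun k => (k, "")))).insert k (f k)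
        = PySem.Dict.mk ((pre ++ [(k, f k)]) ++ ks.map (fun k => (k, ""))) := by
      apply PySem.Dict.ext
      rw [hit, hmap]
      simp
    rw [hd]
    have hnd' : ((pre ++ [(k, f k)]).map Prod.fst ++ ks).Nodup := by
      simpa using h
    rw [ih (pre ++ [(k, f k)]) hnd']
    simp

-- port A's output dict: initialise to "" then overwrite every key
theorem pv_items_A (keys : List String) (hnd : keys.Nodup) (F : String → String) :
    (keys.foldl (fun d id => d.insert id (F id))
        (keys.foldl (fun d i => d.insert i "") PySem.Dict.empty)).items
      = keys.map (fun k => (k, F k)) := by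
  have h0 : (keys.foldl (fun d i => d.insert i "") PySem.Dict.empty)
      = PySem.Dict.mk ([] ++ keys.map (fun k => (k, ""))) := by
    apply PySem.Dict.ext
    have := PySem.Dict.items_foldl_insert_fresh keys (fun a => a) (fun _ => "")
      PySem.Dict.empty (by simp) (by simpa using hnd)
    simpa using this
  rw [h0, pv_overwrite keys F [] (by simpa using hnd)]
  simp

-- port B's output dict: every inserted key is fresh
theorem pv_items_B (keys : List String) (hnd : keys.Nodup) (G : String → String) :
    (keys.foldl (fun d id => d.insert id (G id)) PySem.Dict.empty).items
      = keys.map (fun k => (k, G k)) := by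
  have := PySem.Dict.items_foldl_insert_fresh keys (fun a => a) G
    PySem.Dict.empty (by simp) (by simpa using hnd)
  simpa using this

-- the per-area string: A's sort-everything-and-look-up equals B's count-and-repeat
theorem pv_area (dd : List (String × List Int)) :
    (let iks := PySem.List.dedup (dd.map Prod.fst)
     let tf := (iks.map (fun i => pvLk dd i)).flatten
     let tfid : PySem.Dict Int String :=
       iks.foldl (fun t i => (pvLk dd i).foldl (fun t j => t.insert j i) t) PySem.Dict.empty
     PySem.Str.join "" ((PySem.List.sorted tf (fun x => x)).map (fun i => (tfid.get? i).getD "")))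
    = (let p := (PySem.List.dedup (dd.map Prod.fst)).foldl (fun p sub =>
          (pvLk dd sub).foldl
            (fun p v => (p.1.insert v sub, p.2.insert v (p.2.getD v 0 + 1))) p)
        ((PySem.Dict.empty : PySem.Dict Int String), (PySem.Dict.empty : PySem.Dict Int Int))
       PySem.Str.join ""
        ((PySem.List.sorted p.2.keys (fun x => x)).map
          (fun v => pvStrMul ((p.1.get? v).getD "") (p.2.getD v 0)))) := by
  simp only []
  have hsplit : (PySem.List.dedup (dd.map Prod.fst)).foldl (fun p sub =>
          (pvLk dd sub).foldl
            (fun p v => (p.1.insert v sub, p.2.insert v (p.2.getD v 0 + 1))) p)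
        ((PySem.Dict.empty : PySem.Dict Int String), (PySem.Dict.empty : PySem.Dict Int Int))
      = ((PySem.List.dedup (dd.map Prod.fst)).foldl
           (fun t i => (pvLk dd i).foldl (fun t j => t.insert j i) t) PySem.Dict.empty,
         (PySem.List.dedup (dd.map Prod.fst)).foldl
           (fun c sub => (pvLk dd sub).foldl (fun c v => c.insert v (c.getD v 0 + 1)) c)
           PySem.Dict.empty) :=
    pv_foldl_prod_nested (PySem.List.dedup (dd.map Prod.fst)) (pvLk dd)
      (fun (t : PySem.Dict Int String) sub v => t.insert v sub)
      (fun (c : PySem.Dict Int Int) v => c.insert v (c.getD v 0 + 1))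
      PySem.Dict.empty PySem.Dict.empty
  rw [hsplit]
  have hcnt : (PySem.List.dedup (dd.map Prod.fst)).foldl
      (fun c sub => (pvLk dd sub).foldl (fun c v => c.insert v (c.getD v 0 + 1)) c)
      PySem.Dict.empty
      = PySem.Dict.counter ((PySem.List.dedup (dd.map Prod.fst)).map (fun i => pvLk dd i)).flatten := by
    rw [← PySem.Dict.foldl_insert_getD_add_one_eq_counter, List.foldl_flatten, List.foldl_map]
  rw [hcnt, PySem.Dict.keys_counter]
  set tf := ((PySem.List.dedup (dd.map Prod.fst)).map (fun i => pvLk dd i)).flatten with htf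
  have hgetD : ∀ v : Int, (PySem.Dict.counter tf).getD v 0 = (tf.count v : Int) :=
    fun v => PySem.Dict.getD_counter tf v
  rw [pv_sorted_eq_flatMap tf]
  rw [pv_join_blocks (PySem.List.sorted (PySem.Set.ofList tf) (fun x => x)) _ (fun v => tf.count v)]
  apply congrArg
  apply List.map_congr_left
  intro v _
  rw [pvStrMul, hgetD v, Int.toNat_natCast]

-- ===== VERDICT (by name: the statement is the Claim_ definition above) =====
theorem dwell_path_spec : Claim_equal_dwell_path := by
  intro dta _
  unfold Spec_dwell_path dwell_path dwell_path_alt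
  simp only []
  have hnd : (PySem.List.dedup (dta.map Prod.fst)).Nodup := PySem.List.nodup_dedup _
  rw [pv_items_A _ hnd, pv_items_B _ hnd]
  apply List.map_congr_left
  intro id _
  exact congrArg (fun s => (id, s)) (pv_area ((List.lookup id dta).getD []))
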